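-- pv_equiv track=rewrite | github.com/mahajialirezaei/Sum_diff_in_array | algorithm2.py | boosted_algorithm
-- ===== SOURCE A (Python) =====
-- def boosted_algorithm(lst, n):
--     sum = 0
--     lst.sort()
--     for i in range(int(n/2)):
--         sum += -1 * (n-1-(i * 2)) * lst[i]
--     for i in range(int(n/2)):
--         sum += +1 * (n-1-(i * 2)) * lst[n - 1 - i]
--
--
--
--     return sum
-- ===== SOURCE B (Python) =====
-- def boosted_algorithm(lst, n):
--     # sum of pairwise differences via a running prefix sum: each element
--     # contributes i*lst[i] minus the sum of all smaller-ranked elements.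
--     lst.sort()
--     total = 0
--     prefix = 0
--     for i in range(n):
--         total += i * lst[i] - prefix
--         prefix += lst[i]
--     return total
-- ===== Notes on version B (the rewrite author's own statement) =====
-- stated objective: alternative
-- what changed: A computes two symmetric rank-weighted half-sums -(n-1-2i)*lst[i] and +(n-1-2i)*lst[n-1-i]; B instead computes the sum of all pairwise differences directly with a running prefix-sum accumulator (each element contributes i*lst[i] minus the sum of the elements ranked below it), with no rank-weight formula at all.
-- outside the precondition, e.g. on boosted_algorithm([], 1): A returns 0, B raises IndexError
import Mathlib
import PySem

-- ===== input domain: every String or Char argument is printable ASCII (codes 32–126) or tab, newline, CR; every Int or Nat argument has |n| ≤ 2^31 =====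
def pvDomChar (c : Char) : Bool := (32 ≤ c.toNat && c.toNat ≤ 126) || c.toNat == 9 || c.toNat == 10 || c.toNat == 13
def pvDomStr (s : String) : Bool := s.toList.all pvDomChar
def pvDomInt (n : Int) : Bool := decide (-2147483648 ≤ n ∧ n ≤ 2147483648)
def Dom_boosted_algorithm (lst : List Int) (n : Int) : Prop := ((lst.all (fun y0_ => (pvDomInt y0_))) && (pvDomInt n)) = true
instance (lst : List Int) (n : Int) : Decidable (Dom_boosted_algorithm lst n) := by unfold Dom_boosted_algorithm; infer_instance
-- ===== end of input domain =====

-- B replaces A's two symmetric rank-weighted half-sums by the pairwise-difference sum computed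
-- with a running prefix-sum accumulator (objective: alternative, same cost). Both A and B sort
-- lst in place (mutation); the equivalence proved here is about the return value.

-- ===== PORT A =====
-- int(n/2) is truncating division: Int.tdiv is exact for it on the admitted |n| ≤ 2^31.
def boosted_algorithm (lst : List Int) (n : Int) : Int :=
  let s := PySem.List.sorted lst (fun x => x) false
  let sum1 := (PySem.List.pyRange 0 (n.tdiv 2) 1).foldl
    (fun acc i => acc + (-1) * (n - 1 - i * 2) * PySem.List.pyGetD s i 0) 0
  (PySem.List.pyRange 0 (n.tdiv 2) 1).foldl
    (fun acc i => acc + 1 * (n - 1 - i * 2) * PySem.List.pyGetD s (n - 1 - i) 0) sum1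

-- ===== PORT B =====
def boosted_algorithm_alt (lst : List Int) (n : Int) : Int :=
  let s := PySem.List.sorted lst (fun x => x) false
  let r := (PySem.List.pyRange 0 n 1).foldl
    (fun (st : Int × Int) i =>
      (st.1 + i * PySem.List.pyGetD s i 0 - st.2, st.2 + PySem.List.pyGetD s i 0)) (0, 0)
  r.1

-- ===== PRECONDITION & SPEC =====
-- Pre_ excludes n > len(lst): there A raises IndexError (and B raises too), except the single
-- degenerate shape n = 1 with lst = [], where A's empty loops return 0 while B's lst[0] raises.
def Pre_boosted_algorithm (lst : List Int) (n : Int) : Prop := n ≤ (lst.length : Int)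
instance (lst : List Int) (n : Int) : Decidable (Pre_boosted_algorithm lst n) := by
  unfold Pre_boosted_algorithm; infer_instance
def pvWitness_boosted_algorithm : List Int × Int := ([3, 1, 2], 3)
def Spec_boosted_algorithm (lst : List Int) (n : Int) (out : Int) : Prop := out = boosted_algorithm_alt lst n
instance (lst : List Int) (n : Int) (out : Int) : Decidable (Spec_boosted_algorithm lst n out) := by unfold Spec_boosted_algorithm; infer_instance

-- ===== CLAIM (what is proved, stated in full; the proofs are below) =====
def Claim_equal_boosted_algorithm : Prop := ∀ (lst : List Int) (n : Int), Dom_boosted_algorithm lst n → Pre_boosted_algorithm lst n → Spec_boosted_algorithm lst n (boosted_algorithm lst n)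

-- ===== LEMMAS AND PROOFS =====

-- a list-range mapped sum is a Finset.range sum (definitional)
theorem pv_sum_map_range (n : ℕ) (f : ℕ → ℤ) :
    ((List.range n).map f).sum = ∑ i ∈ Finset.range n, f i := rfl

-- A's value equals the rank-weighted single sum Σ (2j-(N-1))·s[j]
theorem pv_core (s : List Int) (N : ℕ) :
    (∑ j ∈ Finset.range (N / 2), (-1) * ((N : ℤ) - 1 - (j : ℤ) * 2) * PySem.List.pyGetD s (j : ℤ) 0)
      + ∑ j ∈ Finset.range (N / 2), 1 * ((N : ℤ) - 1 - (j : ℤ) * 2) * PySem.List.pyGetD s ((N : ℤ) - 1 - (j : ℤ)) 0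
    = ∑ j ∈ Finset.range N, (2 * (j : ℤ) - ((N : ℤ) - 1)) * PySem.List.pyGetD s (j : ℤ) 0 := by
  set F : ℕ → ℤ := fun j => (2 * (j : ℤ) - ((N : ℤ) - 1)) * PySem.List.pyGetD s (j : ℤ) 0 with hF
  have h1 : (∑ j ∈ Finset.range (N / 2), (-1) * ((N : ℤ) - 1 - (j : ℤ) * 2) * PySem.List.pyGetD s (j : ℤ) 0)
      = ∑ j ∈ Finset.range (N / 2), F j := by
    refine Finset.sum_congr rfl fun j _ => ?_
    simp only [hF]; ring
  have hsplit : ∑ j ∈ Finset.range N, F j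
      = ∑ j ∈ Finset.range (N / 2), F j + ∑ j ∈ Finset.range (N - N / 2), F (N / 2 + j) := by
    have h := Finset.sum_range_add F (N / 2) (N - N / 2)
    rwa [show N / 2 + (N - N / 2) = N from by omega] at h
  have hrefl : ∑ j ∈ Finset.range (N - N / 2), F (N / 2 + j)
      = ∑ j ∈ Finset.range (N - N / 2), F (N - 1 - j) := by
    rw [← Finset.sum_range_reflect (fun j => F (N / 2 + j)) (N - N / 2)]
    refine Finset.sum_congr rfl fun j hj => ?_
    have hj' := Finset.mem_range.mp hj
    congr 1; omega
  have h2 : (∑ j ∈ Finset.range (N / 2), 1 * ((N : ℤ) - 1 - (j : ℤ) * 2) * PySem.List.pyGetD s ((N : ℤ) - 1 - (j : ℤ)) 0)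
      = ∑ j ∈ Finset.range (N - N / 2), F (N - 1 - j) := by
    have hterm : ∀ j, j < N / 2 →
        1 * ((N : ℤ) - 1 - (j : ℤ) * 2) * PySem.List.pyGetD s ((N : ℤ) - 1 - (j : ℤ)) 0 = F (N - 1 - j) := by
      intro j hj
      have hcast : ((N - 1 - j : ℕ) : ℤ) = (N : ℤ) - 1 - (j : ℤ) := by omega
      simp only [hF, hcast]; ring
    rcases Nat.even_or_odd N with he | ho
    · have hm : N % 2 = 0 := Nat.even_iff.mp he
      have : N - N / 2 = N / 2 := by omega
      rw [this]
      exact Finset.sum_congr rfl fun j hj => hterm j (Finset.mem_range.mp hj)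
    · have hm : N % 2 = 1 := Nat.odd_iff.mp ho
      have : N - N / 2 = N / 2 + 1 := by omega
      rw [this, Finset.sum_range_succ]
      have hmid : F (N - 1 - N / 2) = 0 := by
        have h1 : N - 1 - N / 2 = N / 2 := by omega
        have h2 : 2 * ((N / 2 : ℕ) : ℤ) - ((N : ℤ) - 1) = 0 := by omega
        simp only [hF, h1]
        rw [h2, zero_mul]
      rw [hmid, add_zero]
      exact Finset.sum_congr rfl fun j hj => hterm j (Finset.mem_range.mp hj)
  rw [h1, h2, hsplit, hrefl]

-- B's pair-state fold computes (Σ_{j<N}(j·f j − S j), S N) where S k = Σ_{i<k} f i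
theorem pv_foldl_pair (f : ℕ → ℤ) (N : ℕ) :
    (List.range N).foldl (fun (st : ℤ × ℤ) (j : ℕ) => (st.1 + (j : ℤ) * f j - st.2, st.2 + f j)) (0, 0)
      = (∑ j ∈ Finset.range N, ((j : ℤ) * f j - ∑ i ∈ Finset.range j, f i),
         ∑ i ∈ Finset.range N, f i) := by
  induction N with
  | zero => simp
  | succ N ih =>
      rw [List.range_succ, List.foldl_append, ih]
      simp only [List.foldl_cons, List.foldl_nil, Finset.sum_range_succ, Prod.mk.injEq]
      exact ⟨by ring, trivial⟩

-- the sum of prefix sums equals the co-rank-weighted sum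
theorem pv_sum_prefix (f : ℕ → ℤ) (N : ℕ) :
    ∑ j ∈ Finset.range N, (∑ i ∈ Finset.range j, f i)
      = ∑ j ∈ Finset.range N, ((N : ℤ) - 1 - (j : ℤ)) * f j := by
  induction N with
  | zero => simp
  | succ N ih =>
      rw [Finset.sum_range_succ, ih, Finset.sum_range_succ, ← Finset.sum_add_distrib]
      push_cast
      have hz : ((N : ℤ) + 1 - 1 - (N : ℤ)) * f N = 0 := by ring
      rw [hz, add_zero]
      exact Finset.sum_congr rfl fun j _ => by ring

-- unfold both ports over a common sorted list and reduce to the three lemmas above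
theorem pv_ports_eq (s : List Int) (n : Int) :
    ((PySem.List.pyRange 0 (n.tdiv 2) 1).foldl
        (fun acc i => acc + 1 * (n - 1 - i * 2) * PySem.List.pyGetD s (n - 1 - i) 0)
        ((PySem.List.pyRange 0 (n.tdiv 2) 1).foldl
          (fun acc i => acc + (-1) * (n - 1 - i * 2) * PySem.List.pyGetD s i 0) 0))
    = ((PySem.List.pyRange 0 n 1).foldl
        (fun (st : Int × Int) i =>
          (st.1 + i * PySem.List.pyGetD s i 0 - st.2, st.2 + PySem.List.pyGetD s i 0)) (0, 0)).1 := by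
  rw [PySem.List.foldl_add, PySem.List.foldl_add]
  by_cases hle : n ≤ 0
  · have hr1 : PySem.List.pyRange 0 n 1 = [] := PySem.List.pyRange_one_eq_nil hle
    have ht : n.tdiv 2 ≤ 0 := by
      have h2 : (0:ℤ) ≤ (-n).tdiv 2 := Int.tdiv_nonneg (by omega) (by omega)
      have h3 : (-n).tdiv 2 = -(n.tdiv 2) := by rw [Int.neg_tdiv]
      omega
    have hr2 : PySem.List.pyRange 0 (n.tdiv 2) 1 = [] := PySem.List.pyRange_one_eq_nil ht
    simp [hr1, hr2]
  · obtain ⟨N, rfl⟩ : ∃ N : ℕ, n = (N : ℤ) := ⟨n.toNat, (Int.toNat_of_nonneg (by omega)).symm⟩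
    set f : ℕ → ℤ := fun j => PySem.List.pyGetD s (j : ℤ) 0 with hf
    have htdiv : (N : ℤ).tdiv 2 = ((N / 2 : ℕ) : ℤ) := rfl
    rw [htdiv, PySem.List.pyRange_one, PySem.List.pyRange_one]
    simp only [sub_zero, Int.toNat_natCast, List.map_map, Function.comp_def, zero_add,
      List.foldl_map]
    rw [pv_sum_map_range, pv_sum_map_range, pv_foldl_pair f N]
    rw [pv_core s N]
    have : ∑ j ∈ Finset.range N, ((j : ℤ) * f j - ∑ i ∈ Finset.range j, f i)
        = ∑ j ∈ Finset.range N, (j : ℤ) * f j - ∑ j ∈ Finset.range N, (∑ i ∈ Finset.range j, f i) :=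
      Finset.sum_sub_distrib _ _
    rw [this, pv_sum_prefix f N]
    rw [← Finset.sum_sub_distrib]
    exact Finset.sum_congr rfl fun j _ => by ring

-- ===== VERDICT (by name: the statement is the Claim_ definition above) =====
theorem boosted_algorithm_spec : Claim_equal_boosted_algorithm := by
  intro lst n _ _
  unfold Spec_boosted_algorithm boosted_algorithm boosted_algorithm_alt
  exact pv_ports_eq _ n
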